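-- pv_equiv track=rewrite | github.com/cc84693951/twocomparsion | panorama_processor.py | _create_regular_rectangle
-- ===== SOURCE A (Python) =====
-- def _create_regular_rectangle(corners, panorama_width, panorama_height):
--     """基于角点创建规整矩形"""
--     if len(corners) < 4:
--         return corners
--
--     u_coords = [c[0] for c in corners]
--     v_coords = [c[1] for c in corners]
--
--     min_u, max_u = min(u_coords), max(u_coords)
--     min_v, max_v = min(v_coords), max(v_coords)
--
--     # 确保坐标在有效范围内
--     min_u = max(0, min_u)
--     max_u = min(panorama_width - 1, max_u)
--     min_v = max(0, min_v)
--     max_v = min(panorama_height - 1, max_v)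
--
--     # 返回规整的矩形四个角点
--     return [(min_u, min_v), (max_u, min_v), (max_u, max_v), (min_u, max_v)]
-- ===== SOURCE B (Python) =====
-- def _create_regular_rectangle(corners, panorama_width, panorama_height):
--     """Sort-then-pick: sort each coordinate axis, read the extremes off the ends."""
--     if len(corners) < 4:
--         return corners
--
--     us = sorted(u for u, _ in corners)
--     vs = sorted(v for _, v in corners)
--
--     min_u = max(0, us[0])
--     max_u = min(panorama_width - 1, us[-1])
--     min_v = max(0, vs[0])
--     max_v = min(panorama_height - 1, vs[-1])
--
--     return [(min_u, min_v), (max_u, min_v), (max_u, max_v), (min_u, max_v)]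
-- ===== Notes on version B (the rewrite author's own statement) =====
-- stated objective: alternative
-- what changed: Replaced A's four min/max reduction scans with a sort-then-pick strategy: sort each coordinate axis once and read the extremes off the first and last elements of the sorted lists.
import Mathlib
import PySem

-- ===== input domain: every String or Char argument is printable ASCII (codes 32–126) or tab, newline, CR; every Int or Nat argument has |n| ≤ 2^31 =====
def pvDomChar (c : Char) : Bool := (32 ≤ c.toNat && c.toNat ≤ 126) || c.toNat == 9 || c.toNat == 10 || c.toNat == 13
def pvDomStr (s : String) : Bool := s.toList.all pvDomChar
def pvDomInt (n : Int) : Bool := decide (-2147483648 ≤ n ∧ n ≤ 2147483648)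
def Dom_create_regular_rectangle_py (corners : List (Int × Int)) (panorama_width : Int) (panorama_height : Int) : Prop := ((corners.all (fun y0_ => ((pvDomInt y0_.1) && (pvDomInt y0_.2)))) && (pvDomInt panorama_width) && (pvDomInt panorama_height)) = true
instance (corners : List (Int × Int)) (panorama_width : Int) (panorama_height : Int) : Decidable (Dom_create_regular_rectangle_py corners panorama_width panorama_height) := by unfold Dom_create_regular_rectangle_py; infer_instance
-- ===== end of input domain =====

-- B replaces A's four min/max reduction scans with sort-then-pick: sort each axis, read extremes off the ends (objective: alternative).

-- ===== PORT A =====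
-- Python's min/max on a nonempty int list is the running fold (PySem min?_id_cons/max?_id_cons);
-- the match is never [] since the guard requires length ≥ 4.
def create_regular_rectangle_py (corners : List (Int × Int)) (panorama_width : Int) (panorama_height : Int) : List (Int × Int) :=
  if corners.length < 4 then corners
  else
    match corners with
    | [] => []  -- unreachable (length ≥ 4)
    | c0 :: rest =>
      let u_tail := rest.map Prod.fst
      let v_tail := rest.map Prod.snd
      let min_u := u_tail.foldl min c0.1
      let max_u := u_tail.foldl max c0.1
      let min_v := v_tail.foldl min c0.2
      let max_v := v_tail.foldl max c0.2
      let min_u := max 0 min_u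
      let max_u := min (panorama_width - 1) max_u
      let min_v := max 0 min_v
      let max_v := min (panorama_height - 1) max_v
      [(min_u, min_v), (max_u, min_v), (max_u, max_v), (min_u, max_v)]

-- ===== PORT B =====
-- sorted(...) is PySem.List.sorted; us[0]/us[-1] are head/last of the (nonempty) sorted list,
-- exposed by matching — never [] since the guard requires length ≥ 4.
def create_regular_rectangle_py_alt (corners : List (Int × Int)) (panorama_width : Int) (panorama_height : Int) : List (Int × Int) :=
  if corners.length < 4 then corners
  else
    let us := PySem.List.sorted (corners.map Prod.fst) (fun x => x) false
    let vs := PySem.List.sorted (corners.map Prod.snd) (fun x => x) false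
    match us, vs with
    | u0 :: ut, v0 :: vt =>
      let min_u := max 0 u0
      let max_u := min (panorama_width - 1) ((u0 :: ut).getLast (by simp))
      let min_v := max 0 v0
      let max_v := min (panorama_height - 1) ((v0 :: vt).getLast (by simp))
      [(min_u, min_v), (max_u, min_v), (max_u, max_v), (min_u, max_v)]
    | _, _ => []  -- unreachable (length ≥ 4)

-- ===== PRECONDITION & SPEC =====
def Spec_create_regular_rectangle_py (corners : List (Int × Int)) (panorama_width : Int) (panorama_height : Int) (out : List (Int × Int)) : Prop := out = create_regular_rectangle_py_alt corners panorama_width panorama_height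
instance (corners : List (Int × Int)) (panorama_width : Int) (panorama_height : Int) (out : List (Int × Int)) : Decidable (Spec_create_regular_rectangle_py corners panorama_width panorama_height out) := by unfold Spec_create_regular_rectangle_py; infer_instance

-- ===== CLAIM =====
def Claim_equal_create_regular_rectangle_py : Prop := ∀ (corners : List (Int × Int)) (panorama_width : Int) (panorama_height : Int), Dom_create_regular_rectangle_py corners panorama_width panorama_height → Spec_create_regular_rectangle_py corners panorama_width panorama_height (create_regular_rectangle_py corners panorama_width panorama_height)

-- ===== LEMMAS AND PROOFS =====

-- head of the sorted list is the running min
theorem sorted_head_eq_foldl_min (x : Int) (r : List Int) (m : Int) (t : List Int)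
    (h : PySem.List.sorted (x :: r) (fun y => y) false = m :: t) :
    m = r.foldl min x := by
  have hmem : r.foldl min x = x ∨ r.foldl min x ∈ r := PySem.List.foldl_min_mem r x
  have hmin := PySem.List.foldl_min_le r x
  have hm_mem : m ∈ (x :: r) := by
    rw [← PySem.List.mem_sorted (x :: r) (fun y => y) false, h]; simp
  have h1 : r.foldl min x ≤ m := by
    rcases List.mem_cons.mp hm_mem with hm | hm
    · exact hm ▸ hmin.1
    · exact hmin.2 m hm
  have h2 : m ≤ r.foldl min x := by
    have hhead := PySem.List.key_head_sorted_le (x :: r) (fun y => y) h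
    rcases hmem with he | he
    · rw [he]; exact hhead x (by simp)
    · exact hhead _ (by simp [he])
  omega

-- last of the sorted list is the running max
theorem sorted_last_eq_foldl_max (x : Int) (r : List Int) (m : Int) (t : List Int)
    (h : PySem.List.sorted (x :: r) (fun y => y) false = m :: t) :
    (m :: t).getLast (by simp) = r.foldl max x := by
  have hmem : r.foldl max x = x ∨ r.foldl max x ∈ r := PySem.List.foldl_max_mem r x
  have hmax := PySem.List.le_foldl_max r x
  have hlast_mem : (m :: t).getLast (by simp) ∈ (x :: r) := by
    rw [← PySem.List.mem_sorted (x :: r) (fun y => y) false, h]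
    exact List.getLast_mem _
  have h1 : (m :: t).getLast (by simp) ≤ r.foldl max x := by
    rcases List.mem_cons.mp hlast_mem with hm | hm
    · exact hm ▸ hmax.1
    · exact hmax.2 _ hm
  have h2 : r.foldl max x ≤ (m :: t).getLast (by simp) := by
    -- the fold's value is a member of the sorted list, hence ≤ the element at the last index
    have hmem' : r.foldl max x ∈ PySem.List.sorted (x :: r) (fun y => y) false := by
      rw [PySem.List.mem_sorted]
      rcases hmem with he | he
      · simp [he]
      · simp [he]
    rw [h] at hmem'
    obtain ⟨i, hi, hival⟩ := List.mem_iff_getElem.mp hmem'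
    have hmono := PySem.List.key_sorted_getElem_mono (x :: r) (fun y => y)
      (p := i) (q := (m :: t).length - 1)
      (by simp only [List.length_cons] at hi ⊢; omega) (by rw [h]; simp)
    rw [List.getLast_eq_getElem]
    simp only [h] at hmono
    simpa [hival] using hmono
  omega

-- ===== VERDICT =====
theorem create_regular_rectangle_py_spec : Claim_equal_create_regular_rectangle_py := by
  intro corners w h _
  unfold Spec_create_regular_rectangle_py create_regular_rectangle_py create_regular_rectangle_py_alt
  split
  · rfl
  · rename_i hlen
    cases corners with
    | nil => simp at hlen
    | cons c0 rest =>
      simp only [List.map_cons]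
      rcases hu : PySem.List.sorted (c0.1 :: rest.map Prod.fst) (fun x => x) false with _ | ⟨u0, ut⟩
      · exact absurd ((PySem.List.sorted_eq_nil_iff _ _ _).mp hu) (by simp)
      rcases hv : PySem.List.sorted (c0.2 :: rest.map Prod.snd) (fun x => x) false with _ | ⟨v0, vt⟩
      · exact absurd ((PySem.List.sorted_eq_nil_iff _ _ _).mp hv) (by simp)
      simp only
      rw [← sorted_head_eq_foldl_min _ _ _ _ hu, ← sorted_last_eq_foldl_max _ _ _ _ hu,
          ← sorted_head_eq_foldl_min _ _ _ _ hv, ← sorted_last_eq_foldl_max _ _ _ _ hv]
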